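-- pv_equiv track=rewrite | github.com/yanalauzer/algorithms2 | 2.1-yanalauzer/5.py | find_maximum_summands
-- ===== SOURCE A (Python) =====
-- def find_maximum_summands(n):
--     summands = []
--     current_number = 1
--
--     while n > 0:
--         if n >= current_number:
--             summands.append(current_number)
--             n -= current_number
--             current_number += 1
--         else:
--             summands[-1] += n
--             n = 0
--
--     return summands
-- ===== SOURCE B (Python) =====
-- def find_maximum_summands(n):
--     # Closed-form: the answer has k = floor((isqrt(8n+1)-1)/2) summands
--     # (largest k with k*(k+1)/2 <= n); isqrt is computed by integer Newton
--     # iteration, then the list 1..k is emitted with the remainder folded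
--     # into the last element.
--     if n <= 0:
--         return []
--     m = 8 * n + 1
--     x = m
--     y = (x + m // x) // 2
--     while y < x:
--         x = y
--         y = (x + m // x) // 2
--     k = (x - 1) // 2
--     return list(range(1, k)) + [k + n - k * (k + 1) // 2]
-- ===== Notes on version B (the rewrite author's own statement) =====
-- stated objective: faster
-- what changed: B replaces A's greedy subtract-and-append loop by a closed-form construction: it computes isqrt(8n+1) by integer Newton iteration, derives the summand count k = (isqrt(8n+1)-1)//2, and emits list(range(1,k)) plus a last element carrying the remainder.
import Mathlib
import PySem

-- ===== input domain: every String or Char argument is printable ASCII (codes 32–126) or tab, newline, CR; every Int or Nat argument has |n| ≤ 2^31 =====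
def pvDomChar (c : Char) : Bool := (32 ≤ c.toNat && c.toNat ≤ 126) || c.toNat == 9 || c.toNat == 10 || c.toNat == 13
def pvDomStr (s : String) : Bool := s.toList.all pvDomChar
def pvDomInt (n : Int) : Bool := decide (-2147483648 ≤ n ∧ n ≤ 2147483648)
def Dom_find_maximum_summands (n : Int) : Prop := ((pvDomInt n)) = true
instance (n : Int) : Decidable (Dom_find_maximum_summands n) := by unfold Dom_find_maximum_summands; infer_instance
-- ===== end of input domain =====

-- B derives the summand count in closed form via a Newton integer square root and builds the list in one shot; same values as A everywhere.

-- ===== PORT A =====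
-- summands[-1] += x; Python raises IndexError on [], but the loop only reaches
-- this with a nonempty list (the first iteration always appends), so the [] case is unreachable.
def pvBumpLast : List Int → Int → List Int
  | [], _ => []
  | [a], x => [a + x]
  | a :: l, x => a :: pvBumpLast l x

-- the while loop of A; fuel = n.toNat + 1 suffices since each iteration with n > 0
-- either ends the loop or decreases n by current_number ≥ 1
def pvLoopA : Nat → Int → Int → List Int → List Int
  | 0, _, _, acc => acc
  | f + 1, n, c, acc =>
    if 0 < n then
      if c ≤ n then pvLoopA f (n - c) (c + 1) (acc ++ [c])
      else pvBumpLast acc n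
    else acc

def find_maximum_summands (n : Int) : List Int :=
  pvLoopA (n.toNat + 1) n 1 []

-- ===== PORT B =====
-- the Newton isqrt while loop of B: state (x, y), runs while y < x;
-- fuel = m.toNat + 1 suffices since x strictly decreases and starts at m
def pvNewton : Nat → Int → Int → Int → Int
  | 0, _, x, _ => x
  | f + 1, m, x, y =>
    if y < x then
      pvNewton f m y (PySem.Int.floordiv (y + PySem.Int.floordiv m y) 2)
    else x

def find_maximum_summands_alt (n : Int) : List Int :=
  if n ≤ 0 then []
  else
    let m := 8 * n + 1
    let x :=
      pvNewton (m.toNat + 1) m m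
        (PySem.Int.floordiv (m + PySem.Int.floordiv m m) 2)
    let k := PySem.Int.floordiv (x - 1) 2
    PySem.List.pyRange 1 k 1 ++ [k + n - PySem.Int.floordiv (k * (k + 1)) 2]

-- ===== PRECONDITION & SPEC =====
def Spec_find_maximum_summands (n : Int) (out : List Int) : Prop := out = find_maximum_summands_alt n
instance (n : Int) (out : List Int) : Decidable (Spec_find_maximum_summands n out) := by unfold Spec_find_maximum_summands; infer_instance

-- ===== CLAIM (what is proved, stated in full; the proofs are below) =====
def Claim_equal_find_maximum_summands : Prop := ∀ (n : Int), Dom_find_maximum_summands n → Spec_find_maximum_summands n (find_maximum_summands n)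

-- ===== LEMMAS AND PROOFS =====

def pvTri (k : Int) : Int := k * (k + 1) / 2

def pvSqrtI (m : Int) : Int := (m.toNat.sqrt : Int)

lemma pvTri_succ (j : Int) : pvTri (j + 1) = pvTri j + (j + 1) := by
  unfold pvTri
  have h : (j + 1) * (j + 1 + 1) = j * (j + 1) + (j + 1) * 2 := by ring
  rw [h, Int.add_mul_ediv_right _ _ (by norm_num : (2:Int) ≠ 0)]

lemma pvTri_zero : pvTri 0 = 0 := by decide

lemma pvLe_tri (k : Int) (hk : 0 ≤ k) : k ≤ pvTri k := by
  unfold pvTri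
  rcases eq_or_lt_of_le hk with h0 | h1
  · rw [← h0]; decide
  · have h2 : k * 2 ≤ k * (k + 1) := by
      have := mul_le_mul_of_nonneg_left (by linarith : (2:Int) ≤ k + 1) hk
      linarith
    exact Int.le_ediv_of_mul_le (by norm_num) h2

lemma pvBumpLast_append (l : List Int) (a x : Int) :
    pvBumpLast (l ++ [a]) x = l ++ [a + x] := by
  induction l with
  | nil => rfl
  | cons b t ih =>
    cases t with
    | nil => simp [pvBumpLast]
    | cons c u => simpa [pvBumpLast] using ih

lemma pvLoopA_nonpos (f : Nat) (n c : Int) (acc : List Int) (h : n ≤ 0) :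
    pvLoopA f n c acc = acc := by
  cases f with
  | zero => rfl
  | succ f => simp [pvLoopA, not_lt.mpr h]

lemma pvSqrtI_sq_le (m : Int) (hm : 0 ≤ m) : pvSqrtI m * pvSqrtI m ≤ m := by
  unfold pvSqrtI
  have h : ((m.toNat.sqrt * m.toNat.sqrt : Nat) : Int) ≤ (m.toNat : Int) := by
    have h0 : m.toNat.sqrt * m.toNat.sqrt ≤ m.toNat := by
      simpa [pow_two] using Nat.sqrt_le' m.toNat
    exact_mod_cast h0
  push_cast at h
  have h2 : (m.toNat : Int) = m := by omega
  linarith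

lemma pvLt_succ_pvSqrtI_sq (m : Int) :
    m < (pvSqrtI m + 1) * (pvSqrtI m + 1) := by
  unfold pvSqrtI
  have h : ((m.toNat : Nat) : Int) < (((m.toNat.sqrt + 1) * (m.toNat.sqrt + 1) : Nat) : Int) := by
    have h0 : m.toNat < (m.toNat.sqrt + 1) * (m.toNat.sqrt + 1) := by
      simpa [pow_two, Nat.succ_eq_add_one] using Nat.lt_succ_sqrt' m.toNat
    exact_mod_cast h0
  push_cast at h
  have h2 : m ≤ (m.toNat : Int) := by omega
  linarith

lemma pvSqrtI_pos (m : Int) (hm : 1 ≤ m) : 1 ≤ pvSqrtI m := by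
  unfold pvSqrtI
  have h : 1 ≤ m.toNat := by omega
  have := Nat.sqrt_le_sqrt (by omega : 1 ≤ m.toNat)
  simpa [Nat.sqrt_one] using (by exact_mod_cast this : (1:Int) ≤ (m.toNat.sqrt : Int))

-- one Newton step stays ≥ isqrt m (integer AM–GM)
lemma pvStep_ge (m x : Int) (hm : 1 ≤ m) (hx : 1 ≤ x) :
    pvSqrtI m ≤ PySem.Int.floordiv (x + PySem.Int.floordiv m x) 2 := by
  set s := pvSqrtI m with hs
  have hs0 : 1 ≤ s := pvSqrtI_pos m hm
  have hsq : s * s ≤ m := pvSqrtI_sq_le m (by omega)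
  have h1 : 2 * s - x ≤ PySem.Int.floordiv m x := by
    rw [PySem.Int.le_floordiv_iff_mul_le (by omega : (0:Int) < x)]
    nlinarith [sq_nonneg (s - x)]
  rw [PySem.Int.le_floordiv_iff_mul_le (by norm_num : (0:Int) < 2)]
  omega

-- the Newton loop computes isqrt m exactly
lemma pvNewton_eq : ∀ (f : Nat) (m x : Int), 1 ≤ m → pvSqrtI m ≤ x →
    x.toNat < f →
    pvNewton f m x (PySem.Int.floordiv (x + PySem.Int.floordiv m x) 2) = pvSqrtI m := by
  intro f
  induction f with
  | zero => intro m x _ _ hf; omega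
  | succ f ih =>
    intro m x hm hsx hf
    set s := pvSqrtI m with hs
    have hs0 : 1 ≤ s := pvSqrtI_pos m hm
    have hx : 1 ≤ x := by omega
    set y := PySem.Int.floordiv (x + PySem.Int.floordiv m x) 2 with hy
    have hys : s ≤ y := pvStep_ge m x hm hx
    by_cases hlt : y < x
    · rw [show pvNewton (f + 1) m x y =
          pvNewton f m y (PySem.Int.floordiv (y + PySem.Int.floordiv m y) 2) from by
        simp only [pvNewton, if_pos hlt]]
      exact ih m y hm hys (by omega)
    · simp only [pvNewton, if_neg hlt]
      -- at exit x ≤ y; show x = s: if s < x then x*x > m so m // x < x and y < x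
      by_contra hne
      have hsltx : s < x := lt_of_le_of_ne hsx (fun h => hne h.symm)
      have hmlt : m < x * x := by
        have := pvLt_succ_pvSqrtI_sq m
        nlinarith
      have hdiv : PySem.Int.floordiv m x < x := by
        rw [PySem.Int.floordiv_lt_iff_lt_mul (by omega : (0:Int) < x)]
        exact hmlt
      have : y < x := by
        rw [hy, PySem.Int.floordiv_lt_iff_lt_mul (by norm_num : (0:Int) < 2)]
        omega
      omega

-- alt at a value tri k + r (1 ≤ k, 0 ≤ r ≤ k) is rng 1 k ++ [k + r]
lemma pvAlt_closed (n k r : Int) (hn : n = pvTri k + r) (hk : 1 ≤ k) (hr0 : 0 ≤ r)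
    (hrk : r ≤ k) :
    find_maximum_summands_alt n = PySem.List.pyRange 1 k 1 ++ [k + r] := by
  have htk : k ≤ pvTri k := pvLe_tri k (by omega)
  have htri : 2 * pvTri k = k * (k + 1) := by
    obtain ⟨t, ht⟩ := Int.even_mul_succ_self k
    unfold pvTri
    omega
  have hn1 : 1 ≤ n := by omega
  have hm1 : 1 ≤ 8 * n + 1 := by omega
  -- square bracket: (2k+1)^2 ≤ 8n+1 < (2k+3)^2, so isqrt(8n+1) is 2k+1 or 2k+2
  have hlo : (2 * k + 1) * (2 * k + 1) ≤ 8 * n + 1 := by nlinarith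
  have hhi : 8 * n + 1 < (2 * k + 3) * (2 * k + 3) := by nlinarith
  have hsq := pvSqrtI_sq_le (8 * n + 1) (by omega)
  have hsq2 := pvLt_succ_pvSqrtI_sq (8 * n + 1)
  have hs1 : 1 ≤ pvSqrtI (8 * n + 1) := pvSqrtI_pos _ hm1
  have hsl : 2 * k + 1 ≤ pvSqrtI (8 * n + 1) := by nlinarith
  have hsu : pvSqrtI (8 * n + 1) ≤ 2 * k + 2 := by nlinarith
  have hsm : pvSqrtI (8 * n + 1) ≤ 8 * n + 1 := by nlinarith
  unfold find_maximum_summands_alt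
  rw [if_neg (by omega : ¬ n ≤ 0)]
  simp only []
  rw [pvNewton_eq ((8 * n + 1).toNat + 1) (8 * n + 1) (8 * n + 1) hm1 hsm (by omega)]
  have hk2 : PySem.Int.floordiv (pvSqrtI (8 * n + 1) - 1) 2 = k := by
    rw [PySem.Int.floordiv_eq_iff_of_pos (by norm_num : (0:Int) < 2)]
    omega
  rw [hk2]
  have htri2 : PySem.Int.floordiv (k * (k + 1)) 2 = pvTri k := by
    rw [PySem.Int.floordiv_eq_iff_of_pos (by norm_num : (0:Int) < 2)]
    omega
  rw [htri2, show k + n - pvTri k = k + r from by omega]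

lemma pvAlt_nonpos (n : Int) (h : n ≤ 0) : find_maximum_summands_alt n = [] := by
  simp only [find_maximum_summands_alt, if_pos h]

lemma pvLoopA_spec : ∀ (f : Nat) (n c : Int), 1 ≤ c → 0 < n → n.toNat < f →
    pvLoopA f n c (PySem.List.pyRange 1 c 1) = find_maximum_summands_alt (n + pvTri (c - 1)) := by
  intro f
  induction f with
  | zero => intro n c _ _ hf; omega
  | succ f ih =>
    intro n c hc hn hf
    have hsucc := pvTri_succ (c - 1)
    rw [show c - 1 + 1 = c from by ring] at hsucc
    rw [show pvLoopA (f + 1) n c (PySem.List.pyRange 1 c 1) =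
        if c ≤ n then pvLoopA f (n - c) (c + 1) (PySem.List.pyRange 1 c 1 ++ [c])
        else pvBumpLast (PySem.List.pyRange 1 c 1) n from by
      simp only [pvLoopA, if_pos hn]]
    have hext : PySem.List.pyRange 1 c 1 ++ [c] = PySem.List.pyRange 1 (c + 1) 1 :=
      (PySem.List.pyRange_one_succ_right (by omega : (1:Int) ≤ c)).symm
    by_cases hcn : c ≤ n
    · rw [if_pos hcn, hext]
      by_cases hz : 0 < n - c
      · rw [ih (n - c) (c + 1) (by omega) hz (by omega)]
        rw [show c + 1 - 1 = c from by ring]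
        rw [show n - c + pvTri c = n + pvTri (c - 1) from by omega]
      · have hnc : n = c := by omega
        rw [pvLoopA_nonpos f (n - c) (c + 1) _ (by omega)]
        rw [show n + pvTri (c - 1) = pvTri c + 0 from by omega]
        rw [pvAlt_closed (pvTri c + 0) c 0 rfl hc le_rfl (by omega)]
        rw [← hext, show c + 0 = c from by ring]
    · rw [if_neg hcn]
      have hsplit : PySem.List.pyRange 1 c 1 = PySem.List.pyRange 1 (c - 1) 1 ++ [c - 1] := by
        have h := PySem.List.pyRange_one_succ_right (a := 1) (b := c - 1) (by omega)
        rw [show c - 1 + 1 = c from by ring] at h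
        exact h
      rw [show n + pvTri (c - 1) = pvTri (c - 1) + n from by ring]
      rw [pvAlt_closed (pvTri (c - 1) + n) (c - 1) n rfl (by omega) (by omega) (by omega)]
      rw [hsplit, pvBumpLast_append]

-- ===== VERDICT (by name: the statement is the Claim_ definition above) =====
theorem find_maximum_summands_spec : Claim_equal_find_maximum_summands := by
  intro n _
  unfold Spec_find_maximum_summands
  by_cases hn : 0 < n
  · have h := pvLoopA_spec (n.toNat + 1) n 1 (le_refl 1) hn (by omega)
    simp [PySem.List.pyRange_one_eq_nil (le_refl (1:Int))] at h
    simpa [find_maximum_summands, pvTri_zero] using h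
  · unfold find_maximum_summands
    rw [pvLoopA_nonpos (n.toNat + 1) n 1 [] (by omega)]
    rw [pvAlt_nonpos n (by omega)]
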